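-- pv_equiv track=rewrite | github.com/taruma/framelab | run.py | find_duplicate_media_tags
-- ===== SOURCE A (Python) =====
-- from typing import Any, Tuple
--
-- def find_duplicate_media_tags(media_items: list[dict[str, Any]]) -> list[str]:
--     seen: dict[str, str] = {}
--     duplicates: set[str] = set()
--
--     for item in media_items:
--         tag = str(item.get("tag", "")).strip()
--         if not tag:
--             continue
--
--         normalized = tag.lower()
--         if normalized in seen:
--             duplicates.add(seen[normalized])
--             duplicates.add(tag)
--         else:
--             seen[normalized] = tag
--
--     return sorted(duplicates)
-- ===== SOURCE B (Python) =====
-- def find_duplicate_media_tags(media_items):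
--     # Group stripped tags by their lower-cased form in one pass, then collect
--     # every spelling of any group that occurs at least twice.
--     index: dict[str, list[str]] = {}
--     for item in media_items:
--         tag = str(item.get("tag", "")).strip()
--         if not tag:
--             continue
--         index.setdefault(tag.lower(), []).append(tag)
--
--     result: set[str] = set()
--     for group in index.values():
--         if len(group) >= 2:
--             result.update(group)
--
--     return sorted(result)
-- ===== Notes on version B (the rewrite author's own statement) =====
-- stated objective: alternative
-- what changed: B replaces A's online seen-dict/duplicate-set scan with a two-phase grouping: one pass builds an index from lowercased tag to the list of its original spellings, then groups of size >= 2 are collected into the result set.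
import Mathlib
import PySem

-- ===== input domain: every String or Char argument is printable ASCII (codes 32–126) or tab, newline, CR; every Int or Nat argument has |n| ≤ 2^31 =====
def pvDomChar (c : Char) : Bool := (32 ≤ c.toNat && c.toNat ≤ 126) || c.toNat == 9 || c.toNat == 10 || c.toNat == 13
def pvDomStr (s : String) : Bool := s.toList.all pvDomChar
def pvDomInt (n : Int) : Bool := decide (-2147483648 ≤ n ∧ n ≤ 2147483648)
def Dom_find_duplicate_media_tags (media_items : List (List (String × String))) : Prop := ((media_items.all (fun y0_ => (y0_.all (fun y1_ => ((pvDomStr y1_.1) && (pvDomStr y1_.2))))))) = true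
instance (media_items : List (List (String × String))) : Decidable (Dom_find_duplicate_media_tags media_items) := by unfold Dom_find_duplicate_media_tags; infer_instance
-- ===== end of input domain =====

-- B is an alternative decomposition: group spellings by lowercased tag first, then collect
-- every spelling of any group of size ≥ 2 (same cost; no speed claim).

-- tag = str(item.get("tag", "")).strip()   (shared by both ports; str() is the identity on strings)
def pvTag (item : List (String × String)) : String :=
  PySem.Str.strip ((PySem.Dict.mk item).getD "tag" "")

-- ===== PORT A =====
def find_duplicate_media_tags (media_items : List (List (String × String))) : List String :=
  let st := media_items.foldl
    (fun (st : PySem.Dict String String × PySem.Set String) item =>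
      let tag := pvTag item
      if tag = "" then st
      else
        let normalized := PySem.Str.lower tag
        match st.1.get? normalized with
        | some v => (st.1, (st.2.add v).add tag)
        | none => (st.1.insert normalized tag, st.2))
    (PySem.Dict.empty, PySem.Set.empty)
  PySem.List.sorted st.2 (fun x => x) false

-- ===== PORT B =====
def find_duplicate_media_tags_alt (media_items : List (List (String × String))) : List String :=
  let index : PySem.Dict String (List String) := media_items.foldl
    (fun idx item =>
      let tag := pvTag item
      if tag = "" then idx
      else idx.modify (PySem.Str.lower tag) [] (· ++ [tag]))
    PySem.Dict.empty
  let result := index.values.foldl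
    (fun (r : PySem.Set String) group =>
      if 2 ≤ group.length then r.update group else r)
    PySem.Set.empty
  PySem.List.sorted result (fun x => x) false

-- ===== PRECONDITION & SPEC =====
-- Python A is total, so Pre_ is trivially true (it excludes nothing):
def Pre_find_duplicate_media_tags (media_items : List (List (String × String))) : Prop := True
-- A never raises: each item's "tag" value is read with a default ("") and every other step is total.
instance (media_items : List (List (String × String))) : Decidable (Pre_find_duplicate_media_tags media_items) := by unfold Pre_find_duplicate_media_tags; infer_instance
def pvWitness_find_duplicate_media_tags : (List (List (String × String))) :=
  [[("tag", " Foo ")], [("id", "1")], [("tag", "FOO")], [("tag", "bar")], [("tag", "")], [("tag", "bar")]]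

def Spec_find_duplicate_media_tags (media_items : List (List (String × String))) (out : List String) : Prop := out = find_duplicate_media_tags_alt media_items
instance (media_items : List (List (String × String))) (out : List String) : Decidable (Spec_find_duplicate_media_tags media_items out) := by unfold Spec_find_duplicate_media_tags; infer_instance

-- ===== CLAIM (what is proved, stated in full; the proofs are below) =====
def Claim_equal_find_duplicate_media_tags : Prop := ∀ (media_items : List (List (String × String))), Dom_find_duplicate_media_tags media_items → Pre_find_duplicate_media_tags media_items → Spec_find_duplicate_media_tags media_items (find_duplicate_media_tags media_items)

-- ===== LEMMAS AND PROOFS =====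

-- the list of non-empty stripped tags, in order
def pvTags (media_items : List (List (String × String))) : List String :=
  media_items.filterMap (fun it => if pvTag it = "" then none else some (pvTag it))

-- the tags of ts whose lowercase is k, in order
def pvGrp (ts : List String) (k : String) : List String :=
  ts.filter (fun t => PySem.Str.lower t == k)

theorem pvGrp_append_singleton (ts : List String) (t k : String) :
    pvGrp (ts ++ [t]) k = pvGrp ts k ++ (if PySem.Str.lower t = k then [t] else []) := by
  simp [pvGrp, List.filter_append]
  split_ifs with h <;> simp [h]

theorem pvMem_grp (ts : List String) (k x : String) :
    x ∈ pvGrp ts k ↔ x ∈ ts ∧ PySem.Str.lower x = k := by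
  simp [pvGrp, List.mem_filter]

-- a fold that skips empty tags is a fold over pvTags
theorem pvFold_tags {σ : Type} (g : σ → String → σ) :
    ∀ (media_items : List (List (String × String))) (s : σ),
      media_items.foldl (fun s it => if pvTag it = "" then s else g s (pvTag it)) s
        = (pvTags media_items).foldl g s := by
  intro items
  induction items with
  | nil => intro s; simp [pvTags]
  | cons it rest ih =>
    intro s
    by_cases h : pvTag it = "" <;> simp [pvTags, h, ih, List.foldl_cons]

-- A's loop, with empty tags skipped, is a loop over pvTags (zeta-reduced form of the port's fold)
theorem pvA_fold (media_items : List (List (String × String)))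
    (st : PySem.Dict String String × PySem.Set String) :
    media_items.foldl
      (fun (st : PySem.Dict String String × PySem.Set String) item =>
        if pvTag item = "" then st
        else
          match st.1.get? (PySem.Str.lower (pvTag item)) with
          | some v => (st.1, (st.2.add v).add (pvTag item))
          | none => (st.1.insert (PySem.Str.lower (pvTag item)) (pvTag item), st.2)) st
      = (pvTags media_items).foldl
        (fun (st : PySem.Dict String String × PySem.Set String) tag =>
          match st.1.get? (PySem.Str.lower tag) with
          | some v => (st.1, (st.2.add v).add tag)
          | none => (st.1.insert (PySem.Str.lower tag) tag, st.2)) st :=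
  pvFold_tags
    (fun (st : PySem.Dict String String × PySem.Set String) tag =>
      match st.1.get? (PySem.Str.lower tag) with
      | some v => (st.1, (st.2.add v).add tag)
      | none => (st.1.insert (PySem.Str.lower tag) tag, st.2)) media_items st

-- B's loop, with empty tags skipped, is a loop over pvTags
theorem pvB_fold (media_items : List (List (String × String)))
    (idx : PySem.Dict String (List String)) :
    media_items.foldl
      (fun (idx : PySem.Dict String (List String)) item =>
        if pvTag item = "" then idx
        else idx.modify (PySem.Str.lower (pvTag item)) [] (· ++ [pvTag item])) idx
      = (pvTags media_items).foldl
        (fun (idx : PySem.Dict String (List String)) tag =>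
          idx.modify (PySem.Str.lower tag) [] (· ++ [tag])) idx :=
  pvFold_tags
    (fun (idx : PySem.Dict String (List String)) tag =>
      idx.modify (PySem.Str.lower tag) [] (· ++ [tag])) media_items idx

-- ===== A-side loop invariant =====
theorem pvA_loop (ts : List String) :
    ∀ (tp : List String) (seen : PySem.Dict String String) (dup : PySem.Set String),
      (∀ k, seen.get? k = (pvGrp tp k).head?) →
      (∀ x, x ∈ dup ↔ x ∈ tp ∧ 2 ≤ (pvGrp tp (PySem.Str.lower x)).length) →
      dup.Nodup →
      (∀ x, x ∈ (ts.foldl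
          (fun (st : PySem.Dict String String × PySem.Set String) tag =>
            match st.1.get? (PySem.Str.lower tag) with
            | some v => (st.1, (st.2.add v).add tag)
            | none => (st.1.insert (PySem.Str.lower tag) tag, st.2)) (seen, dup)).2
        ↔ x ∈ (tp ++ ts) ∧ 2 ≤ (pvGrp (tp ++ ts) (PySem.Str.lower x)).length) ∧
      (ts.foldl
          (fun (st : PySem.Dict String String × PySem.Set String) tag =>
            match st.1.get? (PySem.Str.lower tag) with
            | some v => (st.1, (st.2.add v).add tag)
            | none => (st.1.insert (PySem.Str.lower tag) tag, st.2)) (seen, dup)).2.Nodup := by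
  induction ts with
  | nil => intro tp seen dup hseen hdup hnd; simpa using ⟨hdup, hnd⟩
  | cons t ts ih =>
    intro tp seen dup hseen hdup hnd
    have htp : tp ++ t :: ts = (tp ++ [t]) ++ ts := by simp
    rw [List.foldl_cons, htp]
    have hget := hseen (PySem.Str.lower t)
    cases hg : (pvGrp tp (PySem.Str.lower t)).head? with
    | none =>
      -- no previous tag with this lowercase: insert into seen
      have hgrp : pvGrp tp (PySem.Str.lower t) = [] := List.head?_eq_none_iff.mp hg
      rw [hg] at hget
      simp only [hget]
      apply ih (tp ++ [t])
      · intro k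
        by_cases hk : k = PySem.Str.lower t
        · subst hk
          rw [PySem.Dict.get?_insert_self, pvGrp_append_singleton, hgrp]
          simp
        · rw [PySem.Dict.get?_insert_of_ne _ _ hk, pvGrp_append_singleton]
          simp [Ne.symm hk, hseen k]
      · intro x
        rw [hdup x, pvGrp_append_singleton]
        by_cases hx : PySem.Str.lower x = PySem.Str.lower t
        · rw [hx, hgrp]
          simp
        · rw [if_neg (fun h => hx h.symm), List.append_nil]
          simp only [List.mem_append, List.mem_singleton]
          constructor
          · rintro ⟨h1, h2⟩; exact ⟨Or.inl h1, h2⟩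
          · rintro ⟨h1 | h1, h2⟩
            · exact ⟨h1, h2⟩
            · subst h1; exact absurd rfl hx
      · exact hnd
    | some v =>
      -- a previous tag with this lowercase exists
      rw [hg] at hget
      simp only [hget]
      have hvmem : v ∈ pvGrp tp (PySem.Str.lower t) := List.mem_of_mem_head? (by rw [hg]; rfl)
      have hvtp : v ∈ tp := ((pvMem_grp tp _ v).mp hvmem).1
      have hvlow : PySem.Str.lower v = PySem.Str.lower t := ((pvMem_grp tp _ v).mp hvmem).2
      have hlen1 : 1 ≤ (pvGrp tp (PySem.Str.lower t)).length :=
        List.length_pos_of_mem hvmem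
      apply ih (tp ++ [t])
      · intro k
        by_cases hk : k = PySem.Str.lower t
        · subst hk
          rw [pvGrp_append_singleton, if_pos rfl, hseen _]
          cases h : pvGrp tp (PySem.Str.lower t) with
          | nil => rw [h] at hg; simp at hg
          | cons a l => simp
        · rw [pvGrp_append_singleton]
          simp [Ne.symm hk, hseen k]
      · intro x
        rw [PySem.Set.mem_add, PySem.Set.mem_add, hdup x, pvGrp_append_singleton]
        by_cases hx : PySem.Str.lower x = PySem.Str.lower t
        · rw [hx, if_pos rfl]
          simp only [List.length_append, List.length_cons, List.length_nil,
            List.mem_append, List.mem_singleton]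
          constructor
          · rintro ((⟨h1, h2⟩ | h1) | h1)
            · exact ⟨Or.inl h1, by omega⟩
            · subst h1; exact ⟨Or.inl hvtp, by omega⟩
            · subst h1; exact ⟨Or.inr rfl, by omega⟩
          · rintro ⟨h1 | h1, _⟩
            · -- x ∈ tp with the same lowercase: either already a duplicate or the unique first
              have hxg : x ∈ pvGrp tp (PySem.Str.lower t) :=
                (pvMem_grp tp _ x).mpr ⟨h1, hx⟩
              by_cases h2 : 2 ≤ (pvGrp tp (PySem.Str.lower t)).length
              · exact Or.inl (Or.inl ⟨h1, h2⟩)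
              · -- the group has exactly one element, so x = v
                have hlen : (pvGrp tp (PySem.Str.lower t)).length = 1 := by omega
                obtain ⟨a, ha⟩ := List.length_eq_one_iff.mp hlen
                rw [ha] at hxg hg
                simp at hxg hg
                exact Or.inl (Or.inr (hxg.trans hg))
            · exact Or.inr h1
        · rw [if_neg (fun h => hx h.symm), List.append_nil]
          simp only [List.mem_append, List.mem_singleton]
          constructor
          · rintro ((⟨h1, h2⟩ | h1) | h1)
            · exact ⟨Or.inl h1, h2⟩
            · subst h1; exact absurd hvlow hx
            · subst h1; exact absurd rfl hx
          · rintro ⟨h1 | h1, h2⟩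
            · exact Or.inl (Or.inl ⟨h1, h2⟩)
            · subst h1; exact absurd rfl hx
      · exact PySem.Set.nodup_add _ _ (PySem.Set.nodup_add _ _ hnd)

-- lookup in a dict whose items are a nodup key list mapped to (k, f k)
theorem pvGet_map (S : List String) (f : String → List String) (k : String) :
    (PySem.Dict.mk (S.map (fun k => (k, f k)))).get? k
      = if k ∈ S then some (f k) else none := by
  induction S with
  | nil => simp [PySem.Dict.get?]
  | cons a S ih =>
    simp only [List.map_cons]
    rw [PySem.Dict.get?_mk_cons]
    by_cases h : a = k
    · subst h; simp
    · simp only [beq_iff_eq, if_neg h, List.mem_cons]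
      rw [ih]
      simp [Ne.symm h]

-- ===== B-side loop invariant: the index groups tags by lowercase, keys in first-seen order =====
theorem pvB_loop (ts : List String) :
    ∀ (tp : List String),
      (ts.foldl
          (fun (idx : PySem.Dict String (List String)) tag =>
            idx.modify (PySem.Str.lower tag) [] (· ++ [tag]))
          (PySem.Dict.mk ((PySem.Set.ofList (tp.map PySem.Str.lower)).map
            (fun k => (k, pvGrp tp k))))).items
        = (PySem.Set.ofList ((tp ++ ts).map PySem.Str.lower)).map
            (fun k => (k, pvGrp (tp ++ ts) k)) := by
  induction ts with
  | nil => intro tp; simp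
  | cons t ts ih =>
    intro tp
    have htp : tp ++ t :: ts = (tp ++ [t]) ++ ts := by simp
    rw [List.foldl_cons, htp]
    have hofl : PySem.Set.ofList ((tp ++ [t]).map PySem.Str.lower)
        = (PySem.Set.ofList (tp.map PySem.Str.lower)).add (PySem.Str.lower t) := by
      rw [PySem.Set.ofList_eq_foldl, PySem.Set.ofList_eq_foldl]
      simp [List.foldl_append]
    have hstep :
        (PySem.Dict.mk ((PySem.Set.ofList (tp.map PySem.Str.lower)).map
            (fun k => (k, pvGrp tp k)))).modify (PySem.Str.lower t) [] (· ++ [t])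
        = PySem.Dict.mk ((PySem.Set.ofList ((tp ++ [t]).map PySem.Str.lower)).map
            (fun k => (k, pvGrp (tp ++ [t]) k))) := by
      rw [PySem.Dict.modify]
      set S := PySem.Set.ofList (tp.map PySem.Str.lower) with hS
      have hget := pvGet_map S (pvGrp tp) (PySem.Str.lower t)
      by_cases hmem : PySem.Str.lower t ∈ S
      · -- key present: in-place replacement; the key set is unchanged
        have hcont : (PySem.Dict.mk (S.map (fun k => (k, pvGrp tp k)))).contains
            (PySem.Str.lower t) = true := by
          rw [PySem.Dict.contains_eq_isSome_get?, hget, if_pos hmem]; rfl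
        have hofl' : PySem.Set.ofList ((tp ++ [t]).map PySem.Str.lower) = S := by
          rw [hofl, PySem.Set.add, if_pos (by simpa [PySem.Set.contains_iff] using hmem)]
        rw [PySem.Dict.getD, hget, if_pos hmem]
        rw [PySem.Dict.insert, if_pos hcont, hofl']
        congr 1
        rw [List.map_map]
        apply List.map_congr_left
        intro k hk
        by_cases hkt : k = PySem.Str.lower t
        · subst hkt
          simp [pvGrp_append_singleton]
        · simp only [Function.comp, beq_iff_eq, if_neg hkt]
          rw [pvGrp_append_singleton]
          simp [Ne.symm hkt]
      · -- new key: appended at the end with the singleton group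
        have hcont : (PySem.Dict.mk (S.map (fun k => (k, pvGrp tp k)))).contains
            (PySem.Str.lower t) = false := by
          rw [PySem.Dict.contains_eq_isSome_get?, hget, if_neg hmem]; rfl
        rw [PySem.Dict.getD, hget, if_neg hmem]
        rw [PySem.Dict.insert, hcont]
        simp only [Bool.false_eq_true, if_false]
        have hofl' : PySem.Set.ofList ((tp ++ [t]).map PySem.Str.lower)
            = S ++ [PySem.Str.lower t] := by
          rw [hofl, PySem.Set.add, if_neg (by simpa [PySem.Set.contains_iff] using hmem)]
        rw [hofl']
        have hgt : pvGrp tp (PySem.Str.lower t) = [] := by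
          rw [List.eq_nil_iff_forall_not_mem]
          intro x hx
          obtain ⟨hx1, hx2⟩ := (pvMem_grp tp _ x).mp hx
          exact hmem (by rw [hS, PySem.Set.mem_ofList, ← hx2]; exact List.mem_map_of_mem hx1)
        congr 1
        rw [List.map_append]
        congr 1
        · apply List.map_congr_left
          intro k hk
          rw [pvGrp_append_singleton]
          have : PySem.Str.lower t ≠ k := fun h => hmem (h ▸ hk)
          simp [this]
        · simp [pvGrp_append_singleton, hgt]
    rw [hstep]
    exact ih (tp ++ [t])

-- ===== B-side result collection =====
theorem pvB_collect (vs : List (List String)) :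
    ∀ (r : PySem.Set String), r.Nodup →
      ((vs.foldl (fun (r : PySem.Set String) group =>
          if 2 ≤ group.length then r.update group else r) r).Nodup ∧
       ∀ x, x ∈ vs.foldl (fun (r : PySem.Set String) group =>
          if 2 ≤ group.length then r.update group else r) r
         ↔ x ∈ r ∨ ∃ g ∈ vs, 2 ≤ g.length ∧ x ∈ g) := by
  induction vs with
  | nil => intro r hr; simp [hr]
  | cons v vs ih =>
    intro r hr
    rw [List.foldl_cons]
    by_cases hv : 2 ≤ v.length
    · rw [if_pos hv]
      obtain ⟨hnd, hmem⟩ := ih (r.update v) (PySem.Set.nodup_update _ _ hr)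
      refine ⟨hnd, fun x => ?_⟩
      rw [hmem x, PySem.Set.mem_update]
      constructor
      · rintro ((h | h) | h)
        · exact Or.inl h
        · exact Or.inr ⟨v, List.mem_cons_self .., hv, h⟩
        · obtain ⟨g, hg, h2, hx⟩ := h
          exact Or.inr ⟨g, List.mem_cons_of_mem _ hg, h2, hx⟩
      · rintro (h | ⟨g, hg, h2, hx⟩)
        · exact Or.inl (Or.inl h)
        · rcases List.mem_cons.mp hg with hgv | hgv
          · subst hgv; exact Or.inl (Or.inr hx)
          · exact Or.inr ⟨g, hgv, h2, hx⟩
    · rw [if_neg hv]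
      obtain ⟨hnd, hmem⟩ := ih r hr
      refine ⟨hnd, fun x => ?_⟩
      rw [hmem x]
      constructor
      · rintro (h | ⟨g, hg, h2, hx⟩)
        · exact Or.inl h
        · exact Or.inr ⟨g, List.mem_cons_of_mem _ hg, h2, hx⟩
      · rintro (h | ⟨g, hg, h2, hx⟩)
        · exact Or.inl h
        · rcases List.mem_cons.mp hg with hgv | hgv
          · subst hgv; exact absurd h2 hv
          · exact Or.inr ⟨g, hgv, h2, hx⟩

-- ===== VERDICT (by name: the statement is the Claim_ definition above) =====
theorem find_duplicate_media_tags_spec : Claim_equal_find_duplicate_media_tags := by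
  intro items _ _
  unfold Spec_find_duplicate_media_tags
  simp only [find_duplicate_media_tags, find_duplicate_media_tags_alt, pvA_fold, pvB_fold]
  set ts := pvTags items with hts
  -- A side: membership characterisation and nodup of the duplicates set
  obtain ⟨hmemA, hndA⟩ := pvA_loop ts [] PySem.Dict.empty PySem.Set.empty
    (by intro k; simp [PySem.Dict.empty, PySem.Dict.get?, pvGrp])
    (by intro x; simp [PySem.Set.empty])
    (by simp [PySem.Set.empty])
  simp only [List.nil_append] at hmemA
  -- B side: the index groups tags by lowercase
  have hidx := pvB_loop ts []
  simp only [List.map_nil, List.nil_append] at hidx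
  have hvals : (ts.foldl
      (fun (idx : PySem.Dict String (List String)) tag =>
        idx.modify (PySem.Str.lower tag) [] (· ++ [tag])) PySem.Dict.empty).values
      = (PySem.Set.ofList (ts.map PySem.Str.lower)).map (fun k => pvGrp ts k) := by
    have : (PySem.Dict.empty : PySem.Dict String (List String))
        = PySem.Dict.mk ((PySem.Set.ofList (([] : List String).map PySem.Str.lower)).map
            (fun k => (k, pvGrp [] k))) := rfl
    rw [this]
    simp only [PySem.Dict.values, List.map_nil] at hidx ⊢
    rw [hidx, List.map_map]
    simp [Function.comp]
  obtain ⟨hndB, hmemB⟩ := pvB_collect _ PySem.Set.empty List.nodup_nil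
  rw [PySem.List.sorted_id_eq_sorted_id_iff_perm]
  rw [List.perm_ext_iff_of_nodup hndA hndB]
  intro x
  rw [hmemA x, hmemB x, hvals]
  simp only [PySem.Set.empty, List.not_mem_nil, false_or, List.mem_map]
  constructor
  · rintro ⟨hx, h2⟩
    refine ⟨pvGrp ts (PySem.Str.lower x), ⟨PySem.Str.lower x, ?_, rfl⟩, h2,
      (pvMem_grp ts _ x).mpr ⟨hx, rfl⟩⟩
    rw [PySem.Set.mem_ofList]
    exact List.mem_map_of_mem hx
  · rintro ⟨g, ⟨k, hk, rfl⟩, h2, hxg⟩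
    obtain ⟨hx1, hx2⟩ := (pvMem_grp ts k x).mp hxg
    rw [hx2]
    exact ⟨hx1, h2⟩
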